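-- pv_equiv track=rewrite | github.com/NesyaLab/Quantum_Anomaly_Detection | functions/AD_preprocessing.py | split_dataset_with_best_batch_size
-- ===== SOURCE A (Python) =====
-- def split_dataset_with_best_batch_size(dataset, overlap=2, batch_sizes=[7, 8, 9, 10]):
--     """
--     Based on available batch sizes and the desired overlap between the batches, tests the dataset in order to split it in the most balanced way,
--     then proceeds to actually effect the split.
--
--     Args:
--         dataset (list of tuples): The dataset to split, represented as a list of (timestamp, value) pairs.
--         overlap (int, optional): The number of overlapping samples between consecutive batches. Default is 2.
--         batch_sizes (list of int, optional): List of possible batch sizes to test. Default is [7, 8, 9, 10].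
--
--     Returns:
--         best_batches (list of lists): A list of batches, where each batch is a list of (timestamp, value) pairs.
--         best_batch_size (int): The batch size that results in the largest final batch.
--     """
--     num_samples = len(dataset)
--     best_batch_size = None
--     best_batches = []
--     max_last_batch_size = 0
--
--     for batch_size in batch_sizes:
--         batches = []
--         start = 0
--
--         while start < num_samples:
--             batch = dataset[start:start + batch_size]
--             batches.append(batch)
--             start += (batch_size - overlap)
--
--         last_batch_size = len(batches[-1])
--
--         if last_batch_size > max_last_batch_size:
--             max_last_batch_size = last_batch_size
--             best_batch_size = batch_size
--             best_batches = batches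
--
--     return best_batches, best_batch_size
-- ===== SOURCE B (Python) =====
-- def split_dataset_with_best_batch_size(dataset, overlap=2, batch_sizes=[7, 8, 9, 10]):
--     num_samples = len(dataset)
--     best_batch_size = None
--     max_last_batch_size = 0
--
--     # Scoring pass: compute each candidate's final-batch length arithmetically,
--     # without materialising any batches.
--     for batch_size in batch_sizes:
--         step = batch_size - overlap
--         num_batches = (num_samples - 1) // step + 1
--         last_start = (num_batches - 1) * step
--         last_batch_size = len(dataset[last_start:last_start + batch_size])
--         if last_batch_size > max_last_batch_size:
--             max_last_batch_size = last_batch_size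
--             best_batch_size = batch_size
--
--     if best_batch_size is None:
--         return [], None
--
--     # Single build pass for the winning batch size only.
--     best_batches = []
--     start = 0
--     step = best_batch_size - overlap
--     while start < num_samples:
--         best_batches.append(dataset[start:start + best_batch_size])
--         start += step
--     return best_batches, best_batch_size
-- ===== Notes on version B (the rewrite author's own statement) =====
-- stated objective: alternative
-- what changed: B scores every candidate batch size arithmetically (step, batch count, last start, one slice) and builds the batch list only once for the winner, instead of materialising all batches for every candidate.
import Mathlib
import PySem

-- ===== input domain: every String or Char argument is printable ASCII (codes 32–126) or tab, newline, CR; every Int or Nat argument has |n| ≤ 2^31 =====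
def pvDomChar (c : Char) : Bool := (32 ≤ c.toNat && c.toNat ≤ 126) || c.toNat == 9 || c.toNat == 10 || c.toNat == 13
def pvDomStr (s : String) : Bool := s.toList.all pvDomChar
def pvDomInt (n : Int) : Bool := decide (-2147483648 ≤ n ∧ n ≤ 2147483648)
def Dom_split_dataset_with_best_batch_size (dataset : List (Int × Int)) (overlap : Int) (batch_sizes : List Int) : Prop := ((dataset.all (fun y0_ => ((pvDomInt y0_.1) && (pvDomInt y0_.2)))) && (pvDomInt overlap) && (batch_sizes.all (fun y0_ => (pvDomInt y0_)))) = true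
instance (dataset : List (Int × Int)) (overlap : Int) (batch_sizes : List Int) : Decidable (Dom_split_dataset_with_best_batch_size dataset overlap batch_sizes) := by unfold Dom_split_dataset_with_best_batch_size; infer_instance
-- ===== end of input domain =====

-- B scores each candidate's final-batch length arithmetically and builds the batch
-- list once for the winner, instead of building all batches for every candidate.


-- ===== PORT A =====
-- the inner 'while start < num_samples' loop, fuel = dataset.length (enough iterations
-- whenever step ≥ 1, i.e. on every input Pre_ admits; fuel only makes the loop total)
def pvSliceLoop (dataset : List (Int × Int)) (bsz step : Int) : Nat → Int → List (List (Int × Int))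
  | 0, _ => []
  | fuel + 1, start =>
    if start < (dataset.length : Int) then
      PySem.List.slice dataset (some start) (some (start + bsz)) ::
        pvSliceLoop dataset bsz step fuel (start + step)
    else []

-- one iteration of A's 'for batch_size in batch_sizes' loop; state = (best_batch_size, best_batches, max_last_batch_size)
def pvStepA (dataset : List (Int × Int)) (overlap : Int)
    (s : Option Int × List (List (Int × Int)) × Int) (batch_size : Int) :
    Option Int × List (List (Int × Int)) × Int :=
  let batches := pvSliceLoop dataset batch_size (batch_size - overlap) dataset.length 0
  -- len(batches[-1]); Python raises IndexError on an empty 'batches' (excluded by Pre_), default [] here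
  let last_batch_size : Int := (((PySem.List.pyGet? batches (-1)).getD []).length : Int)
  if last_batch_size > s.2.2 then (some batch_size, batches, last_batch_size) else s

def split_dataset_with_best_batch_size (dataset : List (Int × Int)) (overlap : Int) (batch_sizes : List Int) : (List (List (Int × Int))) × Option Int :=
  let st := batch_sizes.foldl (pvStepA dataset overlap) (none, [], 0)
  (st.2.1, st.1)

-- ===== PORT B =====
-- arithmetic score: the length of the final batch candidate 'b' would produce
def pvLastLen (dataset : List (Int × Int)) (overlap b : Int) : Int :=
  let step := b - overlap
  let num_batches := PySem.Int.floordiv (((dataset.length : Int)) - 1) step + 1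
  let last_start := (num_batches - 1) * step
  ((PySem.List.slice dataset (some last_start) (some (last_start + b))).length : Int)

-- one iteration of B's scoring loop; state = (best_batch_size, max_last_batch_size)
def pvStepB (dataset : List (Int × Int)) (overlap : Int)
    (s : Option Int × Int) (batch_size : Int) : Option Int × Int :=
  let ll := pvLastLen dataset overlap batch_size
  if ll > s.2 then (some batch_size, ll) else s

def split_dataset_with_best_batch_size_alt (dataset : List (Int × Int)) (overlap : Int) (batch_sizes : List Int) : (List (List (Int × Int))) × Option Int :=
  let st := batch_sizes.foldl (pvStepB dataset overlap) (none, 0)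
  match st.1 with
  | none => ([], none)
  | some b => (pvSliceLoop dataset b (b - overlap) dataset.length 0, some b)

-- ===== PRECONDITION & SPEC =====
-- Pre_ excludes exactly the inputs on which A does not return: an empty dataset with a
-- nonempty batch_sizes list (batches[-1] raises IndexError) and any candidate with
-- batch_size - overlap ≤ 0 (the while loop never terminates).
def Pre_split_dataset_with_best_batch_size (dataset : List (Int × Int)) (overlap : Int) (batch_sizes : List Int) : Prop :=
  batch_sizes = [] ∨ (dataset ≠ [] ∧ ∀ b ∈ batch_sizes, overlap < b)
instance (dataset : List (Int × Int)) (overlap : Int) (batch_sizes : List Int) : Decidable (Pre_split_dataset_with_best_batch_size dataset overlap batch_sizes) := by unfold Pre_split_dataset_with_best_batch_size; infer_instance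
def pvWitness_split_dataset_with_best_batch_size : (List (Int × Int)) × Int × List Int :=
  ([(0, 5), (1, 6), (2, 7), (3, 8), (4, 9)], 1, [2, 3])

def Spec_split_dataset_with_best_batch_size (dataset : List (Int × Int)) (overlap : Int) (batch_sizes : List Int) (out : (List (List (Int × Int))) × Option Int) : Prop := out = split_dataset_with_best_batch_size_alt dataset overlap batch_sizes
instance (dataset : List (Int × Int)) (overlap : Int) (batch_sizes : List Int) (out : (List (List (Int × Int))) × Option Int) : Decidable (Spec_split_dataset_with_best_batch_size dataset overlap batch_sizes out) := by unfold Spec_split_dataset_with_best_batch_size; infer_instance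

-- ===== CLAIM (what is proved, stated in full; the proofs are below) =====
def Claim_equal_split_dataset_with_best_batch_size : Prop := ∀ (dataset : List (Int × Int)) (overlap : Int) (batch_sizes : List Int), Dom_split_dataset_with_best_batch_size dataset overlap batch_sizes → Pre_split_dataset_with_best_batch_size dataset overlap batch_sizes → Spec_split_dataset_with_best_batch_size dataset overlap batch_sizes (split_dataset_with_best_batch_size dataset overlap batch_sizes)

-- ===== LEMMAS AND PROOFS =====

-- the loop produces [] from any start at or past the end, for any fuel
lemma pvSliceLoop_nil (dataset : List (Int × Int)) (bsz step : Int) (fuel : Nat) (start : Int)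
    (h : (dataset.length : Int) ≤ start) : pvSliceLoop dataset bsz step fuel start = [] := by
  cases fuel with
  | zero => rfl
  | succ f => simp [pvSliceLoop]; omega

lemma getLast?_cons_of_getLast? {α : Type} {l : List α} {x v : α}
    (h : l.getLast? = some v) : (x :: l).getLast? = some v := by
  cases l with
  | nil => simp at h
  | cons a t => rw [List.getLast?_cons_cons]; exact h

-- characterisation of the last batch: it starts at start + step * ((n-1-start)/step)
lemma pvSliceLoop_getLast (dataset : List (Int × Int)) (bsz step : Int) (fuel : Nat) :
    ∀ start : Int, start < (dataset.length : Int) →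
    (dataset.length : Int) ≤ start + (fuel : Int) * step → 1 ≤ step →
    (pvSliceLoop dataset bsz step fuel start).getLast? =
      some (PySem.List.slice dataset
        (some (start + step * (((dataset.length : Int) - 1 - start) / step)))
        (some ((start + step * (((dataset.length : Int) - 1 - start) / step)) + bsz))) := by
  induction fuel with
  | zero => intro start h1 h2 _; exfalso; simp at h2; omega
  | succ f ih =>
    intro start h1 h2 hstep
    rw [pvSliceLoop, if_pos h1]
    by_cases hnext : (dataset.length : Int) ≤ start + step
    · rw [pvSliceLoop_nil dataset bsz step f (start + step) hnext]
      have hz : ((dataset.length : Int) - 1 - start) / step = 0 :=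
        Int.ediv_eq_zero_of_lt (by omega) (by omega)
      simp [hz]
    · rw [Int.not_le] at hnext
      have hb : (dataset.length : Int) ≤ (start + step) + (f : Int) * step := by
        have : ((f : Int) + 1) * step = (f : Int) * step + step := by ring
        push_cast at h2; omega
      have := ih (start + step) hnext hb hstep
      rw [getLast?_cons_of_getLast? this]
      have harith : (start + step) + step * (((dataset.length : Int) - 1 - (start + step)) / step)
          = start + step * (((dataset.length : Int) - 1 - start) / step) := by
        have key : ((dataset.length : Int) - 1 - start) / step
            = ((dataset.length : Int) - 1 - start - step) / step + 1 := by
          have h' := Int.add_mul_ediv_right ((dataset.length : Int) - 1 - start - step) 1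
            (by omega : step ≠ 0)
          have h'' : (dataset.length : Int) - 1 - start - step + 1 * step
              = (dataset.length : Int) - 1 - start := by ring
          rw [h''] at h'
          simpa using h'
        rw [key]; ring
      rw [harith]

-- per-candidate: A's measured last-batch length equals B's arithmetic score
lemma lastLen_eq (dataset : List (Int × Int)) (overlap b : Int)
    (hds : dataset ≠ []) (hb : overlap < b) :
    (((PySem.List.pyGet? (pvSliceLoop dataset b (b - overlap) dataset.length 0) (-1)).getD []).length : Int)
      = pvLastLen dataset overlap b := by
  have hn : 1 ≤ (dataset.length : Int) := by
    have := List.length_pos_iff.mpr hds; omega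
  have hstep : 1 ≤ b - overlap := by omega
  have hfuel : (dataset.length : Int) ≤ 0 + ((dataset.length : Nat) : Int) * (b - overlap) := by
    have := mul_le_mul_of_nonneg_left hstep (by omega : (0:Int) ≤ (dataset.length : Int))
    omega
  have hlast := pvSliceLoop_getLast dataset b (b - overlap) dataset.length 0 (by omega) hfuel hstep
  rw [PySem.List.pyGet?_neg_one, hlast]
  unfold pvLastLen
  have hfd : PySem.Int.floordiv ((dataset.length : Int) - 1) (b - overlap)
      = ((dataset.length : Int) - 1) / (b - overlap) :=
    PySem.Int.floordiv_eq_ediv_of_pos (by omega)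
  simp only [hfd, Option.getD_some, zero_add]
  ring_nf

-- the invariant tying A's fold state to B's fold state
def pvInv (dataset : List (Int × Int)) (overlap : Int)
    (s : Option Int × List (List (Int × Int)) × Int) (t : Option Int × Int) : Prop :=
  s.1 = t.1 ∧ s.2.2 = t.2 ∧
  s.2.1 = (match s.1 with
           | none => []
           | some b => pvSliceLoop dataset b (b - overlap) dataset.length 0)

lemma pvInv_step (dataset : List (Int × Int)) (overlap b : Int)
    (hds : dataset ≠ []) (hb : overlap < b)
    (s : Option Int × List (List (Int × Int)) × Int) (t : Option Int × Int)
    (h : pvInv dataset overlap s t) :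
    pvInv dataset overlap (pvStepA dataset overlap s b) (pvStepB dataset overlap t b) := by
  obtain ⟨h1, h2, h3⟩ := h
  simp only [pvStepA, pvStepB]
  rw [lastLen_eq dataset overlap b hds hb, h2]
  split_ifs with hc
  · exact ⟨rfl, rfl, rfl⟩
  · exact ⟨h1, h2, h3⟩

lemma pvInv_foldl (dataset : List (Int × Int)) (overlap : Int) (hds : dataset ≠ []) :
    ∀ (bs : List Int), (∀ b ∈ bs, overlap < b) →
    ∀ (s : Option Int × List (List (Int × Int)) × Int) (t : Option Int × Int),
    pvInv dataset overlap s t →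
    pvInv dataset overlap (bs.foldl (pvStepA dataset overlap) s) (bs.foldl (pvStepB dataset overlap) t) := by
  intro bs
  induction bs with
  | nil => intro _ s t h; exact h
  | cons b rest ih =>
    intro hall s t h
    simp only [List.foldl_cons]
    exact ih (fun x hx => hall x (List.mem_cons_of_mem _ hx)) _ _
      (pvInv_step dataset overlap b hds (hall b (List.mem_cons_self)) s t h)

-- ===== VERDICT (by name: the statement is the Claim_ definition above) =====
theorem split_dataset_with_best_batch_size_spec : Claim_equal_split_dataset_with_best_batch_size := by
  intro dataset overlap batch_sizes _ hpre
  unfold Spec_split_dataset_with_best_batch_size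
  rcases hpre with hnil | ⟨hds, hall⟩
  · subst hnil; rfl
  · have hinv := pvInv_foldl dataset overlap hds batch_sizes hall
      (none, [], 0) (none, 0) ⟨rfl, rfl, rfl⟩
    obtain ⟨h1, _, h3⟩ := hinv
    unfold split_dataset_with_best_batch_size split_dataset_with_best_batch_size_alt
    simp only []
    rw [← h1, h3]
    cases hres : (batch_sizes.foldl (pvStepA dataset overlap) (none, [], 0)).1 <;> simp
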